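-- pv_equiv track=rewrite | github.com/browonkim/cote | 가장먼노드.py | solution
-- ===== SOURCE A (Python) =====
-- from collections import deque
--
-- def solution(n, edge):
--     answer = [1] + [0] * (n - 1)
--     route = [[] for i in range(n)]
--     q = deque([0])
--     for i in edge:
--         route[i[0]-1].append(i[1]-1)
--         route[i[1]-1].append(i[0]-1)
--     while q:
--         l = len(q)
--         for i in range(l):
--             node = q.popleft()
--             for e in route[node]:
--                 if answer[e] == 0:
--                     answer[e] = 1
--                     q.append(e)
--     return l
-- ===== SOURCE B (Python) =====
-- def solution(n, edge):
--     route = [[] for _ in range(n)]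
--     for e in edge:
--         u, v = e[0] - 1, e[1] - 1
--         route[u].append(v)
--         route[v].append(u)
--     dist = [-1] * n
--     dist[0] = 0
--     q = [0]
--     head = 0
--     while head < len(q):
--         node = q[head]
--         head += 1
--         for e in route[node]:
--             if dist[e] == -1:
--                 dist[e] = dist[node] + 1
--                 q.append(e)
--     maxd = max(dist)
--     return dist.count(maxd)
-- ===== Notes on version B (the rewrite author's own statement) =====
-- stated objective: alternative
-- what changed: Replaces the level-synchronous deque BFS (inner for-loop over the current level, returning the last level's queue length) by a flat single-queue BFS that fills a distance table, followed by a separate max/count pass over the distances.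
import Mathlib
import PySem

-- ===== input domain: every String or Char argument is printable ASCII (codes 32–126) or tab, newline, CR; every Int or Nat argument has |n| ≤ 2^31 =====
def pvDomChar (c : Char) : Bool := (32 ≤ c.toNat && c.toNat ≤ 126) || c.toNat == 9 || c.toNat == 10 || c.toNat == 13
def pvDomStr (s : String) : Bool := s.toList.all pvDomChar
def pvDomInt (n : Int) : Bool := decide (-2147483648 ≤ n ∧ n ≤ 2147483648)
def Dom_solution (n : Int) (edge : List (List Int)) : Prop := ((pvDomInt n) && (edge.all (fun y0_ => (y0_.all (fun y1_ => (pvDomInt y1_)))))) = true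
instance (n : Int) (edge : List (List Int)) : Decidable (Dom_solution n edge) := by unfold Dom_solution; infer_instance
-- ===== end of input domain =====

-- B replaces A's level-synchronous BFS (return the last level's queue length) by a flat BFS filling a
-- distance table plus a separate max/count pass; same asymptotic cost ("alternative", not faster).

-- Shared Python-list indexing primitives (wrap semantics of xs[i] for negative i; out-of-range reads
-- return the default and out-of-range writes are no-ops — Pre_solution keeps every index in range,
-- exactly where the Python raises IndexError).
def wrapIdx (len : Nat) (i : Int) : Nat := if i < 0 then (i + len).toNat else i.toNat
def lidx {α : Type} (xs : List α) (i : Int) (d : α) : α := xs.getD (wrapIdx xs.length i) d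
def lset (xs : List Int) (i : Int) (v : Int) : List Int := xs.set (wrapIdx xs.length i) v
def lmod (xs : List (List Int)) (i : Int) (f : List Int → List Int) : List (List Int) :=
  xs.modify (wrapIdx xs.length i) f

-- ===== PORT A =====
-- route[i[0]-1].append(i[1]-1); route[i[1]-1].append(i[0]-1)  for i in edge
def routeA (n : Int) (edge : List (List Int)) : List (List Int) :=
  edge.foldl (fun route i =>
      let route := lmod route (lidx i 0 0 - 1) (fun l => l ++ [lidx i 1 0 - 1])
      lmod route (lidx i 1 0 - 1) (fun l => l ++ [lidx i 0 0 - 1]))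
    (List.replicate n.toNat [])

-- one popped node: for e in route[node]: if answer[e]==0: answer[e]=1; q.append(e)
def stepA (route : List (List Int)) (p : List Int × List Int) (node : Int) : List Int × List Int :=
  (lidx route node []).foldl
    (fun p e => if lidx p.1 e 0 = 0 then (lset p.1 e 1, p.2 ++ [e]) else p) p

-- while q: l = len(q); for i in range(l): node = q.popleft(); ...   return l
-- The inner for-loop pops exactly len(q) nodes, i.e. all of q; the appends of the iteration are
-- collected in the second component.  fuel is only a totality guard (n+2 always suffices under Pre_).
def loopA (route : List (List Int)) : Nat → List Int → List Int → Int → Int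
  | 0, _, _, lastl => lastl
  | fuel+1, ans, q, lastl =>
    if q = [] then lastl else
      let p := q.foldl (stepA route) (ans, [])
      loopA route fuel p.1 p.2 (q.length : Int)

def solution (n : Int) (edge : List (List Int)) : Int :=
  let answer := 1 :: List.replicate (n-1).toNat 0
  let route := routeA n edge
  loopA route (n.toNat + 2) answer [0] 0

-- ===== PORT B =====
def routeB (n : Int) (edge : List (List Int)) : List (List Int) :=
  edge.foldl (fun route e =>
      let u := lidx e 0 0 - 1
      let v := lidx e 1 0 - 1
      let route := lmod route u (fun l => l ++ [v])
      lmod route v (fun l => l ++ [u]))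
    (List.replicate n.toNat [])

-- for e in route[node]: if dist[e] == -1: dist[e] = dist[node] + 1; q.append(e)
def stepB (route : List (List Int)) (dist : List Int) (node : Int) : List Int × List Int :=
  (lidx route node []).foldl
    (fun p e => if lidx p.1 e 0 = -1 then (lset p.1 e (lidx p.1 node 0 + 1), p.2 ++ [e]) else p)
    (dist, [])

-- Source B scans q with a head pointer that only moves forward; pending = q[head:] is the unread suffix,
-- appends land at its end.  fuel is only a totality guard (n+2 always suffices under Pre_).
def loopB (route : List (List Int)) : Nat → List Int → List Int → List Int
  | 0, dist, _ => dist
  | fuel+1, dist, pending =>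
    match pending with
    | [] => dist
    | node :: rest =>
      let p := stepB route dist node
      loopB route fuel p.1 (rest ++ p.2)

-- max(dist): Python keeps the first maximal element (same value for Int)
def pymax (xs : List Int) : Int :=
  match xs with
  | [] => 0
  | x :: t => t.foldl (fun a b => if a < b then b else a) x

def solution_alt (n : Int) (edge : List (List Int)) : Int :=
  let route := routeB n edge
  let dist0 := lset (List.replicate n.toNat (-1)) 0 0
  let dist := loopB route (n.toNat + 2) dist0 [0]
  (dist.count (pymax dist) : Int)

-- ===== PRECONDITION & SPEC =====
-- Exactly the inputs on which the Python A returns normally: n ≥ 1 (else route[0] raises IndexError),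
-- every edge has at least two entries (else i[0]/i[1] raises IndexError) and both endpoints, minus 1,
-- are valid (possibly negative, wrapping) indices into the n node arrays (else IndexError).
def Pre_solution (n : Int) (edge : List (List Int)) : Prop :=
  1 ≤ n ∧ ∀ e ∈ edge, 2 ≤ e.length ∧
    (1 - n ≤ e.getD 0 0 ∧ e.getD 0 0 ≤ n) ∧ (1 - n ≤ e.getD 1 0 ∧ e.getD 1 0 ≤ n)
instance (n : Int) (edge : List (List Int)) : Decidable (Pre_solution n edge) := by
  unfold Pre_solution; infer_instance
def pvWitness_solution : Int × List (List Int) := (2, [[1, 2]])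

def Spec_solution (n : Int) (edge : List (List Int)) (out : Int) : Prop := out = solution_alt n edge
instance (n : Int) (edge : List (List Int)) (out : Int) : Decidable (Spec_solution n edge out) := by
  unfold Spec_solution; infer_instance

-- ===== CLAIM (what is proved, stated in full; the proofs are below) =====
def Claim_equal_solution : Prop := ∀ (n : Int) (edge : List (List Int)), Dom_solution n edge → Pre_solution n edge → Spec_solution n edge (solution n edge)

-- ===== LEMMAS AND PROOFS =====

-- valid (possibly negative) Python index into an array of length L
def InR (L : Nat) (i : Int) : Prop := -(L : Int) ≤ i ∧ i < (L : Int)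

-- the two inner loop bodies, named for the proofs (definitionally the lambdas inside stepA/stepB)
def fA (p : List Int × List Int) (e : Int) : List Int × List Int :=
  if lidx p.1 e 0 = 0 then (lset p.1 e 1, p.2 ++ [e]) else p
def fB (node : Int) (p : List Int × List Int) (e : Int) : List Int × List Int :=
  if lidx p.1 e 0 = -1 then (lset p.1 e (lidx p.1 node 0 + 1), p.2 ++ [e]) else p
-- B's node step with the accumulated queue threaded through (proof-side view of loopB's appends)
def stepB2 (route : List (List Int)) (p : List Int × List Int) (node : Int) : List Int × List Int :=
  ((stepB route p.1 node).1, p.2 ++ (stepB route p.1 node).2)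

theorem wrapIdx_lt_of_InR {L : Nat} {i : Int} (h : InR L i) : wrapIdx L i < L := by
  unfold wrapIdx; obtain ⟨h1, h2⟩ := h; split <;> omega

theorem lidx_nonneg {α : Type} (xs : List α) (i : Int) (d : α) (h : 0 ≤ i) :
    lidx xs i d = xs.getD i.toNat d := by
  unfold lidx wrapIdx; rw [if_neg (by omega)]

theorem length_lset (xs : List Int) (i v : Int) : (lset xs i v).length = xs.length := by
  simp [lset]

theorem getD_lset (xs : List Int) (i v : Int) (j : Nat) :
    (lset xs i v).getD j 0 =
      if wrapIdx xs.length i = j ∧ j < xs.length then v else xs.getD j 0 := by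
  unfold lset
  rw [List.getD_eq_getElem?_getD, List.getD_eq_getElem?_getD, List.getElem?_set]
  by_cases h1 : wrapIdx xs.length i = j
  · by_cases h2 : j < xs.length
    · simp [h1, h2]
    · rw [if_pos h1, if_neg (show ¬ wrapIdx xs.length i < xs.length by omega),
          if_neg (by tauto), List.getElem?_eq_none (by omega)]
  · simp [h1]

theorem lidx_mem_or {α : Type} (xs : List α) (i : Int) (d : α) :
    lidx xs i d ∈ xs ∨ lidx xs i d = d := by
  unfold lidx
  by_cases h : wrapIdx xs.length i < xs.length
  · left; rw [List.getD_eq_getElem _ _ h]; exact List.getElem_mem _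
  · right; exact List.getD_eq_default _ _ (by omega)

theorem countP_set_add (p : Int → Bool) :
    ∀ (xs : List Int) (w : Nat), w < xs.length → ∀ (v : Int),
    (xs.set w v).countP p + (if p (xs.getD w 0) then 1 else 0)
      = xs.countP p + (if p v then 1 else 0) := by
  intro xs
  induction xs with
  | nil => intro w h; simp at h
  | cons x t ih =>
    intro w hw v
    cases w with
    | zero => simp [List.countP_cons]; omega
    | succ w' =>
      have := ih w' (by simpa using hw) v
      simp only [List.set_cons_succ, List.countP_cons, List.getD_cons_succ]
      omega

theorem forall_mem_modify {α : Type} {Q : α → Prop} (xs : List α) (k : Nat) (f : α → α)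
    (h1 : ∀ l ∈ xs, Q l) (h2 : ∀ l ∈ xs, Q (f l)) : ∀ l ∈ xs.modify k f, Q l := by
  intro l hl
  obtain ⟨j, hj, rfl⟩ := List.mem_iff_getElem.1 hl
  rw [List.getElem_modify]
  split
  · exact h2 _ (List.getElem_mem _)
  · exact h1 _ (List.getElem_mem _)

theorem foldl_shift {σ α β : Type} (f : (σ × List β) → α → (σ × List β))
    (hf : ∀ s acc a, f (s, acc) a = ((f (s, []) a).1, acc ++ (f (s, []) a).2)) :
    ∀ (l : List α) (s : σ) (acc : List β),
      l.foldl f (s, acc) = ((l.foldl f (s, [])).1, acc ++ (l.foldl f (s, [])).2) := by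
  intro l
  induction l with
  | nil => intro s acc; simp
  | cons a t ih =>
    intro s acc
    simp only [List.foldl_cons]
    rw [hf s acc a, ih (f (s, []) a).1 (acc ++ (f (s, []) a).2),
        show f (s, ([] : List β)) a = ((f (s, []) a).1, (f (s, []) a).2) from rfl,
        ih (f (s, []) a).1 (f (s, []) a).2]
    simp

theorem fA_shift (s acc : List Int) (a : Int) :
    fA (s, acc) a = ((fA (s, []) a).1, acc ++ (fA (s, []) a).2) := by
  unfold fA; dsimp only; split <;> simp

theorem fB_shift (node : Int) (s acc : List Int) (a : Int) :
    fB node (s, acc) a = ((fB node (s, []) a).1, acc ++ (fB node (s, []) a).2) := by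
  unfold fB; dsimp only; split <;> simp

theorem stepA_eq (route : List (List Int)) (p : List Int × List Int) (node : Int) :
    stepA route p node = (lidx route node []).foldl fA p := rfl

theorem stepB_eq (route : List (List Int)) (dist : List Int) (node : Int) :
    stepB route dist node = (lidx route node []).foldl (fB node) (dist, []) := rfl

theorem stepA_shift (route : List (List Int)) (s acc : List Int) (node : Int) :
    stepA route (s, acc) node
      = ((stepA route (s, []) node).1, acc ++ (stepA route (s, []) node).2) := by
  rw [stepA_eq, stepA_eq]
  exact foldl_shift fA fA_shift _ s acc

theorem stepB2_shift (route : List (List Int)) (s acc : List Int) (node : Int) :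
    stepB2 route (s, acc) node
      = ((stepB2 route (s, []) node).1, acc ++ (stepB2 route (s, []) node).2) := by
  simp [stepB2]

-- joint postcondition of processing some nodes of the level-k frontier, starting from (ans, dist):
-- ansO/distO are the updated arrays and acc the newly discovered nodes (appended by both programs)
structure NodeOut (k : Int) (dist ansO distO acc : List Int) : Prop where
  hlenA : ansO.length = dist.length
  hlenB : distO.length = dist.length
  hrel : ∀ j, j < dist.length → (ansO.getD j 0 = 0 ↔ distO.getD j 0 = -1)
  hbd : ∀ y ∈ distO, -1 ≤ y ∧ y ≤ k + 1
  hkeep : ∀ j, j < dist.length → dist.getD j 0 ≠ -1 → distO.getD j 0 = dist.getD j 0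
  hacc : ∀ x ∈ acc, InR dist.length x ∧ distO.getD (wrapIdx dist.length x) 0 = k + 1
  hck : distO.countP (· == k) = dist.countP (· == k)
  hck1 : distO.countP (· == (k+1)) = dist.countP (· == (k+1)) + acc.length
  hcm1 : distO.countP (· == (-1)) + acc.length = dist.countP (· == (-1))

theorem NodeOut.base {k : Int} {dist ans : List Int}
    (hlen : ans.length = dist.length)
    (hrel : ∀ j, j < dist.length → (ans.getD j 0 = 0 ↔ dist.getD j 0 = -1))
    (hbd : ∀ y ∈ dist, -1 ≤ y ∧ y ≤ k + 1) :
    NodeOut k dist ans dist [] := by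
  refine ⟨hlen, rfl, hrel, hbd, fun _ _ _ => rfl, by simp, rfl, by simp, by simp⟩

theorem NodeOut.comp {k : Int} (hk : 0 ≤ k) {dist a1 d1 acc1 a2 d2 acc2 : List Int}
    (h1 : NodeOut k dist a1 d1 acc1) (h2 : NodeOut k d1 a2 d2 acc2) :
    NodeOut k dist a2 d2 (acc1 ++ acc2) := by
  have hL : d1.length = dist.length := h1.hlenB
  refine ⟨h2.hlenA.trans hL, h2.hlenB.trans hL, ?_, h2.hbd, ?_, ?_, ?_, ?_, ?_⟩
  · intro j hj; exact h2.hrel j (by omega)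
  · intro j hj hne
    have e1 := h1.hkeep j hj hne
    have e2 := h2.hkeep j (by omega) (by rw [e1]; exact hne)
    rw [e2, e1]
  · intro x hx
    rcases List.mem_append.1 hx with hx1 | hx2
    · obtain ⟨hin, hval⟩ := h1.hacc x hx1
      refine ⟨hin, ?_⟩
      have hw : wrapIdx dist.length x < dist.length := wrapIdx_lt_of_InR hin
      have := h2.hkeep (wrapIdx dist.length x) (by omega) (by rw [hval]; omega)
      rw [this, hval]
    · obtain ⟨hin, hval⟩ := h2.hacc x hx2
      rw [hL] at hin hval
      exact ⟨hin, hval⟩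
  · rw [h2.hck, h1.hck]
  · rw [h2.hck1, h1.hck1]; simp; omega
  · have e1 := h1.hcm1
    have e2 := h2.hcm1
    simp only [List.length_append]
    omega

theorem write_step (k : Int) (hk : 0 ≤ k) (e : Int) (ans dist : List Int)
    (hlen : ans.length = dist.length)
    (hrel : ∀ j, j < dist.length → (ans.getD j 0 = 0 ↔ dist.getD j 0 = -1))
    (hbd : ∀ y ∈ dist, -1 ≤ y ∧ y ≤ k + 1)
    (he : InR dist.length e)
    (hce : dist.getD (wrapIdx dist.length e) 0 = -1) :
    NodeOut k dist (lset ans e 1) (lset dist e (k+1)) [e] := by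
  have hw : wrapIdx dist.length e < dist.length := wrapIdx_lt_of_InR he
  have hwa : wrapIdx ans.length e = wrapIdx dist.length e := by rw [hlen]
  refine ⟨by rw [length_lset, hlen], length_lset _ _ _, ?_, ?_, ?_, ?_, ?_, ?_, ?_⟩
  · intro j hj
    rw [getD_lset, getD_lset, hwa, hlen]
    split_ifs with h
    · constructor <;> intro <;> omega
    · exact hrel j hj
  · intro y hy
    rcases List.mem_or_eq_of_mem_set hy with h | h
    · exact hbd y h
    · omega
  · intro j hj hne
    rw [getD_lset]
    split_ifs with h
    · exfalso; obtain ⟨h1, _⟩ := h; rw [← h1] at hne; exact hne hce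
    · rfl
  · intro x hx
    simp only [List.mem_singleton] at hx
    subst hx
    refine ⟨he, ?_⟩
    rw [getD_lset, if_pos ⟨rfl, hw⟩]
  · have h := countP_set_add (· == k) dist _ hw (k+1)
    rw [hce] at h
    have c1 : ((-1 : Int) == k) = false := by rw [beq_eq_false_iff_ne]; omega
    have c2 : ((k+1 : Int) == k) = false := by rw [beq_eq_false_iff_ne]; omega
    rw [c1, c2] at h
    simp only [Bool.false_eq_true, if_false, Nat.add_zero] at h
    exact h
  · have h := countP_set_add (· == (k+1)) dist _ hw (k+1)
    rw [hce] at h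
    have c1 : ((-1 : Int) == (k+1)) = false := by rw [beq_eq_false_iff_ne]; omega
    have c2 : ((k+1 : Int) == (k+1)) = true := by rw [beq_iff_eq]
    rw [c1, c2] at h
    simp only [Bool.false_eq_true, if_false, if_true, Nat.add_zero] at h
    simp only [lset, List.length_singleton]
    omega
  · have h := countP_set_add (· == (-1)) dist _ hw (k+1)
    rw [hce] at h
    have c1 : ((-1 : Int) == (-1 : Int)) = true := by rw [beq_iff_eq]
    have c2 : ((k+1 : Int) == (-1)) = false := by rw [beq_eq_false_iff_ne]; omega
    rw [c1, c2] at h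
    simp only [Bool.false_eq_true, if_false, if_true, Nat.add_zero] at h
    simp only [lset, List.length_singleton]
    omega

theorem node_sim (k : Int) (hk : 0 ≤ k) (node : Int) :
    ∀ (nbrs ans dist : List Int),
    ans.length = dist.length →
    (∀ j, j < dist.length → (ans.getD j 0 = 0 ↔ dist.getD j 0 = -1)) →
    (∀ y ∈ dist, -1 ≤ y ∧ y ≤ k + 1) →
    InR dist.length node →
    dist.getD (wrapIdx dist.length node) 0 = k →
    (∀ e ∈ nbrs, InR dist.length e) →
    (nbrs.foldl fA (ans, [])).2 = (nbrs.foldl (fB node) (dist, [])).2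
      ∧ NodeOut k dist (nbrs.foldl fA (ans, [])).1 (nbrs.foldl (fB node) (dist, [])).1
          (nbrs.foldl (fB node) (dist, [])).2 := by
  intro nbrs
  induction nbrs with
  | nil =>
    intro ans dist hlen hrel hbd hnd hndv hnb
    exact ⟨rfl, NodeOut.base hlen hrel hbd⟩
  | cons e rest ih =>
    intro ans dist hlen hrel hbd hnd hndv hnb
    have he : InR dist.length e := hnb e (by simp)
    have hwe : wrapIdx dist.length e < dist.length := wrapIdx_lt_of_InR he
    have hwa : wrapIdx ans.length e = wrapIdx dist.length e := by rw [hlen]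
    have hlidxB : lidx dist e 0 = dist.getD (wrapIdx dist.length e) 0 := rfl
    have hlidxA : lidx ans e 0 = ans.getD (wrapIdx dist.length e) 0 := by
      unfold lidx; rw [hwa]
    simp only [List.foldl_cons]
    by_cases hc : dist.getD (wrapIdx dist.length e) 0 = -1
    · have hcA : ans.getD (wrapIdx dist.length e) 0 = 0 := (hrel _ hwe).2 hc
      have hfB : fB node (dist, ([] : List Int)) e = (lset dist e (k+1), [e]) := by
        unfold fB; dsimp only
        rw [hlidxB, if_pos hc]
        have : lidx dist node 0 = k := hndv
        rw [this]
        simp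
      have hfA : fA (ans, ([] : List Int)) e = (lset ans e 1, [e]) := by
        unfold fA; dsimp only
        rw [hlidxA, if_pos hcA]
        simp
      rw [hfA, hfB]
      have W := write_step k hk e ans dist hlen hrel hbd he hc
      have hL' : (lset dist e (k+1)).length = dist.length := W.hlenB
      have hndv' : (lset dist e (k+1)).getD (wrapIdx (lset dist e (k+1)).length node) 0 = k := by
        rw [hL']
        have := W.hkeep (wrapIdx dist.length node)
          (wrapIdx_lt_of_InR hnd) (by rw [hndv]; omega)
        rw [this, hndv]
      have ih' := ih (lset ans e 1) (lset dist e (k+1))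
        (by rw [W.hlenA, hL'])
        (by rw [hL']; exact W.hrel)
        W.hbd
        (by rw [hL']; exact hnd)
        hndv'
        (by rw [hL']; intro x hx; exact hnb x (by simp [hx]))
      rw [foldl_shift fA fA_shift rest (lset ans e 1) [e],
          foldl_shift (fB node) (fB_shift node) rest (lset dist e (k+1)) [e]]
      refine ⟨by rw [ih'.1], ?_⟩
      have := NodeOut.comp hk W ih'.2
      simpa using this
    · have hcA : ¬ ans.getD (wrapIdx dist.length e) 0 = 0 := fun h => hc ((hrel _ hwe).1 h)
      have hfB : fB node (dist, ([] : List Int)) e = (dist, []) := by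
        unfold fB; dsimp only; rw [hlidxB, if_neg hc]
      have hfA : fA (ans, ([] : List Int)) e = (ans, []) := by
        unfold fA; dsimp only; rw [hlidxA, if_neg hcA]
      rw [hfA, hfB]
      exact ih ans dist hlen hrel hbd hnd hndv (fun x hx => hnb x (by simp [hx]))

theorem level_sim (route : List (List Int)) (k : Int) (hk : 0 ≤ k) :
    ∀ (q ans dist : List Int),
    ans.length = dist.length →
    (∀ j, j < dist.length → (ans.getD j 0 = 0 ↔ dist.getD j 0 = -1)) →
    (∀ y ∈ dist, -1 ≤ y ∧ y ≤ k + 1) →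
    (∀ x ∈ q, InR dist.length x ∧ dist.getD (wrapIdx dist.length x) 0 = k) →
    (∀ l ∈ route, ∀ x ∈ l, InR dist.length x) →
    (q.foldl (stepA route) (ans, [])).2 = (q.foldl (stepB2 route) (dist, [])).2
      ∧ NodeOut k dist (q.foldl (stepA route) (ans, [])).1 (q.foldl (stepB2 route) (dist, [])).1
          (q.foldl (stepB2 route) (dist, [])).2 := by
  intro q
  induction q with
  | nil =>
    intro ans dist hlen hrel hbd hq hroute
    exact ⟨rfl, NodeOut.base hlen hrel hbd⟩
  | cons node q' ih =>
    intro ans dist hlen hrel hbd hq hroute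
    obtain ⟨hnd, hndv⟩ := hq node (by simp)
    have hnb : ∀ e ∈ lidx route node [], InR dist.length e := by
      rcases lidx_mem_or route node [] with h | h
      · exact hroute _ h
      · rw [h]; intro e he; simp at he
    have NS := node_sim k hk node (lidx route node []) ans dist hlen hrel hbd hnd hndv hnb
    obtain ⟨hacc1, N1⟩ := NS
    have hstepA : stepA route (ans, ([] : List Int)) node
        = ((lidx route node []).foldl fA (ans, [])) := rfl
    have hstepB2 : stepB2 route (dist, ([] : List Int)) node
        = (((lidx route node []).foldl (fB node) (dist, [])).1,
           ((lidx route node []).foldl (fB node) (dist, [])).2) := by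
      simp [stepB2, stepB_eq]
    set A1 := ((lidx route node []).foldl fA (ans, ([] : List Int))).1 with hA1
    set B1 := ((lidx route node []).foldl (fB node) (dist, ([] : List Int))).1 with hB1
    set acc1 := ((lidx route node []).foldl (fB node) (dist, ([] : List Int))).2 with hacc1d
    have hL1 : B1.length = dist.length := N1.hlenB
    have ih' := ih A1 B1
      (by rw [N1.hlenA, hL1])
      (by rw [hL1]; exact N1.hrel)
      N1.hbd
      (by
        rw [hL1]
        intro x hx
        obtain ⟨hin, hval⟩ := hq x (by simp [hx])
        refine ⟨hin, ?_⟩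
        have := N1.hkeep (wrapIdx dist.length x) (wrapIdx_lt_of_InR hin) (by rw [hval]; omega)
        rw [this, hval])
      (by rw [hL1]; exact hroute)
    simp only [List.foldl_cons]
    rw [hstepA, hstepB2]
    rw [show ((lidx route node []).foldl fA (ans, ([] : List Int)))
          = (A1, (((lidx route node []).foldl fA (ans, ([] : List Int)))).2) from rfl]
    rw [hacc1]
    rw [foldl_shift (stepA route) (fun s acc a => stepA_shift route s acc a) q' A1 acc1,
        foldl_shift (stepB2 route) (fun s acc a => stepB2_shift route s acc a) q' B1 acc1]
    refine ⟨by rw [ih'.1], ?_⟩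
    have := NodeOut.comp hk N1 ih'.2
    simpa using this

theorem loopA_nil (route : List (List Int)) (fuel : Nat) (ans : List Int) (lastl : Int) :
    loopA route fuel ans [] lastl = lastl := by
  cases fuel <;> simp [loopA]

theorem loopB_nil (route : List (List Int)) (fuel : Nat) (dist : List Int) :
    loopB route fuel dist [] = dist := by
  cases fuel <;> simp [loopB]

theorem loopA_cons (route : List (List Int)) (fuel : Nat) (ans q : List Int) (lastl : Int)
    (h : q ≠ []) :
    loopA route (fuel+1) ans q lastl
      = loopA route fuel (q.foldl (stepA route) (ans, [])).1
          (q.foldl (stepA route) (ans, [])).2 (q.length : Int) := by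
  simp only [loopA, if_neg h]

theorem loopB_cons (route : List (List Int)) (fuel : Nat) (dist rest : List Int) (node : Int) :
    loopB route (fuel+1) dist (node :: rest)
      = loopB route fuel (stepB route dist node).1 (rest ++ (stepB route dist node).2) := by
  simp only [loopB]

theorem loopB_flatten (route : List (List Int)) :
    ∀ (level : List Int) (fuel : Nat) (dist extra : List Int),
    level.length ≤ fuel →
    loopB route fuel dist (level ++ extra)
      = loopB route (fuel - level.length) (level.foldl (stepB2 route) (dist, [])).1
          (extra ++ (level.foldl (stepB2 route) (dist, [])).2) := by
  intro level
  induction level with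
  | nil => intro fuel dist extra h; simp
  | cons node lv ih =>
    intro fuel dist extra h
    obtain ⟨f, rfl⟩ : ∃ f, fuel = f + 1 := ⟨fuel - 1, by simp at h; omega⟩
    rw [List.cons_append, loopB_cons]
    rw [show (lv ++ extra) ++ (stepB route dist node).2
          = lv ++ (extra ++ (stepB route dist node).2) from by simp]
    rw [ih f _ _ (by simp at h; omega)]
    have hstep : stepB2 route (dist, ([] : List Int)) node
        = ((stepB route dist node).1, (stepB route dist node).2) := by
      simp [stepB2]
    rw [List.foldl_cons, hstep,
        foldl_shift (stepB2 route) (fun s acc a => stepB2_shift route s acc a) lv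
          (stepB route dist node).1 (stepB route dist node).2]
    simp only [List.length_cons, Nat.succ_sub_succ]
    simp [List.append_assoc]

theorem foldl_max_eq :
    ∀ (t : List Int) (x m : Int), (m = x ∨ m ∈ t) → x ≤ m → (∀ y ∈ t, y ≤ m) →
    t.foldl (fun a b => if a < b then b else a) x = m := by
  intro t
  induction t with
  | nil =>
    rintro x m (rfl | h) hx _
    · rfl
    · simp at h
  | cons y t ih =>
    rintro x m hm hx hall
    have hy : y ≤ m := hall y (by simp)
    simp only [List.foldl_cons]
    rcases hm with rfl | hm
    · apply ih _ _ (Or.inl ?_) (by split <;> omega) (fun z hz => hall z (by simp [hz]))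
      split <;> omega
    · simp only [List.mem_cons] at hm
      rcases hm with rfl | hm
      · apply ih _ _ (Or.inl ?_) (by split <;> omega) (fun z hz => hall z (by simp [hz]))
        split <;> omega
      · exact ih _ _ (Or.inr hm) (by split <;> omega) (fun z hz => hall z (by simp [hz]))

theorem pymax_char (xs : List Int) (m : Int) (hne : xs ≠ []) (hm : m ∈ xs)
    (hall : ∀ y ∈ xs, y ≤ m) : pymax xs = m := by
  cases xs with
  | nil => exact absurd rfl hne
  | cons x t =>
    unfold pymax
    apply foldl_max_eq t x m
    · simpa using hm
    · exact hall x (by simp)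
    · intro y hy; exact hall y (by simp [hy])

theorem countP_replicate (p : Int → Bool) (m : Nat) (a : Int) :
    (List.replicate m a).countP p = if p a then m else 0 := by
  induction m with
  | zero => simp
  | succ m ih =>
    rw [List.replicate_succ, List.countP_cons, ih]
    split <;> omega

theorem main_sim (route : List (List Int)) :
    ∀ (z : Nat) (k : Int) (ans dist q : List Int) (fa fb : Nat) (lastl : Int),
    dist.countP (· == (-1)) = z → 0 ≤ k →
    ans.length = dist.length →
    (∀ j, j < dist.length → (ans.getD j 0 = 0 ↔ dist.getD j 0 = -1)) →
    (∀ y ∈ dist, -1 ≤ y ∧ y ≤ k) →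
    (∀ x ∈ q, InR dist.length x ∧ dist.getD (wrapIdx dist.length x) 0 = k) →
    dist.countP (· == k) = q.length →
    q ≠ [] →
    (∀ l ∈ route, ∀ x ∈ l, InR dist.length x) →
    z + 1 ≤ fa → q.length + z ≤ fb →
    loopA route fa ans q lastl
      = ((loopB route fb dist q).count (pymax (loopB route fb dist q)) : Int) := by
  intro z
  induction z using Nat.strong_induction_on with
  | _ z ih =>
  intro k ans dist q fa fb lastl hz hk hlen hrel hbd hq hck hqne hroute hfa hfb
  obtain ⟨fa', rfl⟩ : ∃ fa', fa = fa' + 1 := ⟨fa - 1, by omega⟩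
  have hqpos : 0 < q.length := by
    cases q with
    | nil => exact absurd rfl hqne
    | cons a t => simp
  have hql : q.length ≤ fb := by omega
  have LS := level_sim route k hk q ans dist hlen hrel
    (fun y hy => ⟨(hbd y hy).1, by have := (hbd y hy).2; omega⟩) hq hroute
  obtain ⟨haccEq, N⟩ := LS
  have hflat := loopB_flatten route q fb dist [] hql
  rw [List.append_nil] at hflat
  have hck1_0 : dist.countP (· == (k+1)) = 0 :=
    List.countP_eq_zero.2 (fun a ha => by
      have := (hbd a ha).2
      simp only [beq_iff_eq]
      omega)
  rw [loopA_cons route fa' ans q lastl hqne, hflat]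
  set B1 := (q.foldl (stepB2 route) (dist, ([] : List Int))).1 with hB1d
  set acc := (q.foldl (stepB2 route) (dist, ([] : List Int))).2 with haccd
  rw [haccEq]
  simp only [List.nil_append]
  by_cases hacce : acc = []
  · rw [hacce, loopA_nil, loopB_nil]
    have hcntk : B1.countP (· == k) = q.length := by rw [N.hck, hck]
    have hcntk1 : B1.countP (· == (k+1)) = 0 := by
      rw [N.hck1, hck1_0, hacce]; simp
    have hble : ∀ y ∈ B1, y ≤ k := by
      intro y hy
      have h1 := (N.hbd y hy).2
      have h2 := List.countP_eq_zero.1 hcntk1 y hy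
      simp only [beq_iff_eq] at h2
      omega
    have hbne : B1 ≠ [] := by
      have hle : B1.countP (· == k) ≤ B1.length := List.countP_le_length
      intro h
      rw [h] at hcntk
      simp at hcntk
      omega
    have hex : k ∈ B1 := by
      by_contra hcon
      have h0 : B1.countP (· == k) = 0 :=
        List.countP_eq_zero.2 (fun a ha => by
          simp only [beq_iff_eq]
          intro hak
          exact hcon (hak ▸ ha))
      omega
    have hpm : pymax B1 = k := pymax_char B1 k hbne hex hble
    rw [hpm, List.count_eq_countP, hcntk]
  · have hlp : 0 < acc.length := by
      cases hacc2 : acc with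
      | nil => exact absurd hacc2 hacce
      | cons a t => simp
    have hz' : B1.countP (· == (-1)) + acc.length = z := by rw [N.hcm1, hz]
    have hL : B1.length = dist.length := N.hlenB
    have := ih (B1.countP (· == (-1))) (by omega) (k+1)
      (q.foldl (stepA route) (ans, ([] : List Int))).1 B1 acc fa' (fb - q.length)
      (q.length : Int)
      rfl (by omega)
      (by rw [N.hlenA, hL])
      (by rw [hL]; exact N.hrel)
      N.hbd
      (by
        rw [hL]
        intro x hx
        obtain ⟨hin, hval⟩ := N.hacc x hx
        exact ⟨hin, hval⟩)
      (by rw [N.hck1, hck1_0]; simp)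
      hacce
      (by rw [hL]; exact hroute)
      (by omega) (by omega)
    exact this

theorem route_inv (n : Int) (edge : List (List Int)) (hn : 1 ≤ n)
    (he : ∀ e ∈ edge, 2 ≤ e.length ∧
      (1 - n ≤ e.getD 0 0 ∧ e.getD 0 0 ≤ n) ∧ (1 - n ≤ e.getD 1 0 ∧ e.getD 1 0 ≤ n)) :
    (routeA n edge).length = n.toNat ∧ ∀ l ∈ routeA n edge, ∀ x ∈ l, InR n.toNat x := by
  unfold routeA
  suffices H : ∀ (ed : List (List Int)),
      (∀ e ∈ ed, 2 ≤ e.length ∧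
        (1 - n ≤ e.getD 0 0 ∧ e.getD 0 0 ≤ n) ∧ (1 - n ≤ e.getD 1 0 ∧ e.getD 1 0 ≤ n)) →
      ∀ (init : List (List Int)), init.length = n.toNat →
      (∀ l ∈ init, ∀ x ∈ l, InR n.toNat x) →
      (ed.foldl (fun route i =>
          let route := lmod route (lidx i 0 0 - 1) (fun l => l ++ [lidx i 1 0 - 1])
          lmod route (lidx i 1 0 - 1) (fun l => l ++ [lidx i 0 0 - 1])) init).length = n.toNat
      ∧ ∀ l ∈ (ed.foldl (fun route i =>
          let route := lmod route (lidx i 0 0 - 1) (fun l => l ++ [lidx i 1 0 - 1])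
          lmod route (lidx i 1 0 - 1) (fun l => l ++ [lidx i 0 0 - 1])) init), ∀ x ∈ l, InR n.toNat x by
    refine H edge he (List.replicate n.toNat []) (by simp) ?_
    intro l hl
    rw [List.mem_replicate] at hl
    rw [hl.2]
    intro x hx
    simp at hx
  intro ed
  induction ed with
  | nil => intro _ init h1 h2; exact ⟨h1, h2⟩
  | cons a t iht =>
    intro hed init hlen hmem
    obtain ⟨hal, ha0, ha1⟩ := hed a (by simp)
    have hv0 : lidx a 0 0 = a.getD 0 0 := by rw [lidx_nonneg a 0 0 le_rfl]; rfl
    have hv1 : lidx a 1 0 = a.getD 1 0 := by rw [lidx_nonneg a 1 0 (by omega)]; rfl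
    have hInR0 : InR n.toNat (lidx a 0 0 - 1) := by
      rw [hv0]; exact ⟨by omega, by omega⟩
    have hInR1 : InR n.toNat (lidx a 1 0 - 1) := by
      rw [hv1]; exact ⟨by omega, by omega⟩
    have step1 : ∀ l ∈ lmod init (lidx a 0 0 - 1) (fun l => l ++ [lidx a 1 0 - 1]),
        ∀ x ∈ l, InR n.toNat x := by
      unfold lmod
      apply forall_mem_modify _ _ _ hmem
      intro l hl x hx
      rcases List.mem_append.1 hx with h | h
      · exact hmem l hl x h
      · simp at h; subst h; exact hInR1
    have step2 : ∀ l ∈ lmod (lmod init (lidx a 0 0 - 1) (fun l => l ++ [lidx a 1 0 - 1]))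
        (lidx a 1 0 - 1) (fun l => l ++ [lidx a 0 0 - 1]), ∀ x ∈ l, InR n.toNat x := by
      unfold lmod
      apply forall_mem_modify _ _ _ step1
      intro l hl x hx
      rcases List.mem_append.1 hx with h | h
      · exact step1 l hl x h
      · simp at h; subst h; exact hInR0
    have len2 : (lmod (lmod init (lidx a 0 0 - 1) (fun l => l ++ [lidx a 1 0 - 1]))
        (lidx a 1 0 - 1) (fun l => l ++ [lidx a 0 0 - 1])).length = n.toNat := by
      simp [lmod, List.length_modify, hlen]
    simp only [List.foldl_cons]
    exact iht (fun e heT => hed e (by simp [heT])) _ len2 step2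

-- ===== VERDICT (by name: the statement is the Claim_ definition above) =====
theorem solution_spec : Claim_equal_solution := by
  intro n edge hdom hpre
  unfold Spec_solution
  obtain ⟨hn, he⟩ := hpre
  have hN : n.toNat = (n-1).toNat + 1 := by omega
  have hdist0 : lset (List.replicate n.toNat (-1)) 0 0 = 0 :: List.replicate (n-1).toNat (-1) := by
    unfold lset wrapIdx
    rw [if_neg (by omega)]
    rw [hN, List.replicate_succ]
    simp
  have e1 : solution n edge
      = loopA (routeA n edge) (n.toNat + 2) (1 :: List.replicate (n-1).toNat 0) [0] 0 := rfl
  have e2 : solution_alt n edge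
      = ((loopB (routeA n edge) (n.toNat + 2) (lset (List.replicate n.toNat (-1)) 0 0) [0]).count
          (pymax (loopB (routeA n edge) (n.toNat + 2)
            (lset (List.replicate n.toNat (-1)) 0 0) [0])) : Int) := rfl
  rw [e1, e2, hdist0]
  obtain ⟨hrl, hrm⟩ := route_inv n edge hn he
  have hlen0 : (0 :: List.replicate (n-1).toNat (-1) : List Int).length = n.toNat := by
    simp only [List.length_cons, List.length_replicate]
    omega
  apply main_sim (routeA n edge) ((n-1).toNat) 0
    (1 :: List.replicate (n-1).toNat 0) (0 :: List.replicate (n-1).toNat (-1)) [0]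
    (n.toNat+2) (n.toNat+2) 0
  · rw [List.countP_cons, countP_replicate]
    simp
  · exact le_refl 0
  · simp
  · intro j hj
    cases j with
    | zero => simp
    | succ j =>
      simp only [List.getD_cons_succ]
      simp only [List.length_cons, List.length_replicate] at hj
      rw [List.getD_replicate _ (by omega), List.getD_replicate _ (by omega)]
      simp
  · intro y hy
    simp only [List.mem_cons, List.mem_replicate] at hy
    rcases hy with rfl | ⟨_, rfl⟩ <;> omega
  · intro x hx
    simp only [List.mem_singleton] at hx
    subst hx
    constructor
    · constructor
      · rw [hlen0]; omega
      · rw [hlen0]; omega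
    · have hw : wrapIdx (0 :: List.replicate (n-1).toNat (-1) : List Int).length 0 = 0 := by
        unfold wrapIdx
        rw [if_neg (by omega)]
        rfl
      rw [hw]
      simp
  · rw [List.countP_cons, countP_replicate]
    simp
  · simp
  · intro l hl x hx
    rw [hlen0]
    exact hrm l hl x hx
  · omega
  · simp only [List.length_singleton]
    omega
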